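-- pv_equiv track=rewrite | github.com/Andrem19/ORC_1 | app/services/direct_execution/budgeting.py | _expensive_budget_floor
-- ===== SOURCE A (Python) =====
-- def _expensive_budget_floor(allowed_tools: list[str]) -> int:
--     allowed = {str(item).strip() for item in allowed_tools if str(item).strip()}
--     floor = 1
--     if any(tool.endswith("_sync") for tool in allowed):
--         floor += 1
--     if any(_looks_expensive_or_mutating(tool) for tool in allowed):
--         floor += 1
--     if any(tool.startswith("backtests_") for tool in allowed):
--         floor += 1
--     return min(max(floor, 1), 8)
--
-- def _looks_expensive_or_mutating(tool_name: str) -> bool: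
--     normalized = str(tool_name or "").strip().lower()
--     if not normalized:
--         return False
--     if normalized.startswith("backtests_"):
--         return True
--     if normalized.startswith(("models_", "features_", "experiments_")):
--         return not normalized.endswith(("_inspect", "_read", "_compare", "_registry"))
--     return any(token in normalized for token in ("train", "publish", "build", "refresh", "materialize", "record", "apply", "run"))
-- ===== SOURCE B (Python) =====
-- def _expensive_budget_floor(allowed_tools: list[str]) -> int:
--     sync_flag = expensive_flag = backtest_flag = False
--     for item in allowed_tools:
--         name = str(item).strip()
--         if not name:
--             continue
--         sync_flag = sync_flag or name.endswith("_sync")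
--         expensive_flag = expensive_flag or _looks_expensive_or_mutating(name)
--         backtest_flag = backtest_flag or name.startswith("backtests_")
--     floor = 1 + sync_flag + expensive_flag + backtest_flag
--     return min(max(floor, 1), 8)
--
-- def _looks_expensive_or_mutating(tool_name: str) -> bool:
--     normalized = str(tool_name or "").strip().lower()
--     if not normalized:
--         return False
--     if normalized.startswith("backtests_"):
--         return True
--     if normalized.startswith(("models_", "features_", "experiments_")):
--         return not normalized.endswith(("_inspect", "_read", "_compare", "_registry"))
--     return any(token in normalized for token in ("train", "publish", "build", "refresh", "materialize", "record", "apply", "run"))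
-- ===== Notes on version B (the rewrite author's own statement) =====
-- stated objective: alternative
-- what changed: B replaces A's set comprehension plus three separate any() scans with one single pass over the raw list that strips each name once and accumulates three boolean flags, dropping the dedup set entirely (dedup cannot change an existential).
import Mathlib
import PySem

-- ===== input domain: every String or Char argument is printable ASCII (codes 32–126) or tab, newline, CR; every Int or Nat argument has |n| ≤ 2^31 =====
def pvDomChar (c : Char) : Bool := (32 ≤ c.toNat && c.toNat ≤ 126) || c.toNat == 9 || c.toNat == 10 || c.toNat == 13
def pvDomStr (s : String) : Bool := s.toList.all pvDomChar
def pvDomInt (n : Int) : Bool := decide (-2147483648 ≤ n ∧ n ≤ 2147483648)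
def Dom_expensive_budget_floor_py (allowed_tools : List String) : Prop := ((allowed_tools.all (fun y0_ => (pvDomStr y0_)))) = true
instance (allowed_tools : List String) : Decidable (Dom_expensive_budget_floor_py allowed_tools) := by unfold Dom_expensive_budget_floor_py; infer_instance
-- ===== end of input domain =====

-- B does the same job in one pass over the raw list (three boolean flags) instead of a dedup set plus three any() scans; same cost, plainer shape.

-- ===== PORT A =====
-- shared-module helper _looks_expensive_or_mutating, ported literally (both Pythons carry the identical helper)
def looks_expensive_or_mutating (tool_name : String) : Bool :=
  let normalized := PySem.Str.lower (PySem.Str.strip tool_name)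
  if normalized == "" then false
  else if PySem.Str.startswith normalized "backtests_" then true
  else if (PySem.Str.startswith normalized "models_" || PySem.Str.startswith normalized "features_" ||
           PySem.Str.startswith normalized "experiments_") then
    !(PySem.Str.endswith normalized "_inspect" || PySem.Str.endswith normalized "_read" ||
      PySem.Str.endswith normalized "_compare" || PySem.Str.endswith normalized "_registry")
  else (PySem.Str.isIn "train" normalized || PySem.Str.isIn "publish" normalized ||
        PySem.Str.isIn "build" normalized || PySem.Str.isIn "refresh" normalized ||
        PySem.Str.isIn "materialize" normalized || PySem.Str.isIn "record" normalized ||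
        PySem.Str.isIn "apply" normalized || PySem.Str.isIn "run" normalized)

def expensive_budget_floor_py (allowed_tools : List String) : Int :=
  -- allowed = {str(item).strip() for item in allowed_tools if str(item).strip()}
  let allowed : PySem.Set String :=
    PySem.Set.ofList ((allowed_tools.map PySem.Str.strip).filter (fun t => t != ""))
  let floor : Int := 1
  let floor := if allowed.any (fun tool => PySem.Str.endswith tool "_sync") then floor + 1 else floor
  let floor := if allowed.any (fun tool => looks_expensive_or_mutating tool) then floor + 1 else floor
  let floor := if allowed.any (fun tool => PySem.Str.startswith tool "backtests_") then floor + 1 else floor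
  min (max floor 1) 8

-- ===== PORT B =====
-- one pass: strip each name once, skip empties, accumulate three boolean flags
def ebfAltStep (st : Bool × Bool × Bool) (item : String) : Bool × Bool × Bool :=
  let name := PySem.Str.strip item
  if name == "" then st
  else (st.1 || PySem.Str.endswith name "_sync",
        st.2.1 || looks_expensive_or_mutating name,
        st.2.2 || PySem.Str.startswith name "backtests_")

def expensive_budget_floor_py_alt (allowed_tools : List String) : Int :=
  let flags := allowed_tools.foldl ebfAltStep (false, false, false)
  let floor : Int := 1 + (if flags.1 then 1 else 0) + (if flags.2.1 then 1 else 0) + (if flags.2.2 then 1 else 0)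
  min (max floor 1) 8

-- ===== PRECONDITION & SPEC =====
def Spec_expensive_budget_floor_py (allowed_tools : List String) (out : Int) : Prop := out = expensive_budget_floor_py_alt allowed_tools
instance (allowed_tools : List String) (out : Int) : Decidable (Spec_expensive_budget_floor_py allowed_tools out) := by unfold Spec_expensive_budget_floor_py; infer_instance

-- ===== CLAIM (what is proved, stated in full; the proofs are below) =====
def Claim_equal_expensive_budget_floor_py : Prop := ∀ (allowed_tools : List String), Dom_expensive_budget_floor_py allowed_tools → Spec_expensive_budget_floor_py allowed_tools (expensive_budget_floor_py allowed_tools)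

-- ===== LEMMAS AND PROOFS =====

-- an existential over a Python set equals the existential over the underlying list
theorem any_ofList (xs : List String) (p : String → Bool) :
    (PySem.Set.ofList xs).any p = xs.any p := by
  cases h : xs.any p with
  | true =>
    rw [List.any_eq_true] at h
    obtain ⟨x, hx, hp⟩ := h
    rw [List.any_eq_true]
    exact ⟨x, (PySem.Set.mem_ofList xs x).mpr hx, hp⟩
  | false =>
    rw [List.any_eq_false] at h ⊢
    intro x hx
    exact h x ((PySem.Set.mem_ofList xs x).mp hx)

-- B's single fold computes exactly the three any-scans over the stripped, non-empty names
theorem fold_flags (l : List String) (s e b : Bool) :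
    l.foldl ebfAltStep (s, e, b) =
      (s || ((l.map PySem.Str.strip).filter (fun t => t != "")).any (fun t => PySem.Str.endswith t "_sync"),
       e || ((l.map PySem.Str.strip).filter (fun t => t != "")).any (fun t => looks_expensive_or_mutating t),
       b || ((l.map PySem.Str.strip).filter (fun t => t != "")).any (fun t => PySem.Str.startswith t "backtests_")) := by
  induction l generalizing s e b with
  | nil => simp
  | cons a l ih =>
    by_cases ha : PySem.Str.strip a == ""
    · have h0 : ebfAltStep (s, e, b) a = (s, e, b) := by simp [ebfAltStep, ha]
      have h1 : (PySem.Str.strip a != "") = false := by simp [bne, ha]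
      rw [List.foldl_cons, h0, ih]
      simp only [List.map_cons, List.filter_cons, h1, Bool.false_eq_true, if_false]
    · have h0 : ebfAltStep (s, e, b) a =
          (s || PySem.Str.endswith (PySem.Str.strip a) "_sync",
           e || looks_expensive_or_mutating (PySem.Str.strip a),
           b || PySem.Str.startswith (PySem.Str.strip a) "backtests_") := by
        simp [ebfAltStep, ha]
      have h1 : (PySem.Str.strip a != "") = true := by simp [bne, ha]
      rw [List.foldl_cons, h0, ih]
      simp only [List.map_cons, List.filter_cons, h1, if_true, List.any_cons, Bool.or_assoc]

-- ===== VERDICT (by name: the statement is the Claim_ definition above) =====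
theorem expensive_budget_floor_py_spec : Claim_equal_expensive_budget_floor_py := by
  intro allowed_tools _
  unfold Spec_expensive_budget_floor_py expensive_budget_floor_py expensive_budget_floor_py_alt
  rw [fold_flags]
  simp only [any_ofList, Bool.false_or]
  cases ((allowed_tools.map PySem.Str.strip).filter (fun t => t != "")).any (fun t => PySem.Str.endswith t "_sync") <;>
  cases ((allowed_tools.map PySem.Str.strip).filter (fun t => t != "")).any (fun t => looks_expensive_or_mutating t) <;>
  cases ((allowed_tools.map PySem.Str.strip).filter (fun t => t != "")).any (fun t => PySem.Str.startswith t "backtests_") <;>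
  simp
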